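-- pv_equiv track=rewrite | github.com/47813/Code-Files | Python/Logical Gate/FindingPrimeImplicates.py | check
-- ===== SOURCE A (Python) =====
-- def check(num1, num2):
--     combine = ""
--     count1 = 0
--     for i in range(len(num1)):
--         if num1[i] == num2[i]:
--             count1 += 1
--             combine += '-'
--         else:
--             combine += num1[i]
--     if count1 == 1:
--         return combine
--     else:
--         return None
-- ===== SOURCE B (Python) =====
-- def check(num1, num2):
--     matches = [i for i in range(len(num1)) if num1[i] == num2[i]]
--     if len(matches) != 1:
--         return None
--     idx = matches[0]
--     return num1[:idx] + '-' + num1[idx+1:]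
-- ===== Notes on version B (the rewrite author's own statement) =====
-- stated objective: alternative
-- what changed: Replaces the interleaved build-string-and-count single pass with a find-the-matching-indices-then-slice-splice decomposition: collect the indices where the strings agree, and only when there is exactly one reconstruct the result by slicing num1 around it.
import Mathlib
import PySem

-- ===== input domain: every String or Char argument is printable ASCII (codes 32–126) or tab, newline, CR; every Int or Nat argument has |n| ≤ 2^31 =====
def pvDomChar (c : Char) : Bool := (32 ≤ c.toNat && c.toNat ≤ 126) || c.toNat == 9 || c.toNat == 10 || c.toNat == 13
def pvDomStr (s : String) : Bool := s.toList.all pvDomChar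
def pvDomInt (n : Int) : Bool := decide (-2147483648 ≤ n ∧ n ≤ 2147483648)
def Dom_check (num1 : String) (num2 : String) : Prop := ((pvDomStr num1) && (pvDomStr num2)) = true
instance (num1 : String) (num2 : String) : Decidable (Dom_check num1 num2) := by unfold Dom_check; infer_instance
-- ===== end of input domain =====

-- B replaces A's interleaved build-string-and-count pass by: find all matching indices, then splice num1 around the sole one (alternative decomposition, same cost).

-- ===== PORT A =====
-- for i in range(len(num1)): indexing num1[i]/num2[i]; Pre_check guarantees both are in range (pyGetD is exact there)
def check (num1 : String) (num2 : String) : Option String :=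
  let l1 := num1.toList
  let l2 := num2.toList
  let st := (PySem.List.pyRange 0 l1.length 1).foldl
    (fun (st : List Char × Int) i =>
      if PySem.List.pyGetD l1 i ' ' = PySem.List.pyGetD l2 i ' ' then
        (st.1 ++ ['-'], st.2 + 1)
      else
        (st.1 ++ [PySem.List.pyGetD l1 i ' '], st.2))
    ([], 0)
  if st.2 = 1 then some (String.ofList st.1) else none

-- ===== PORT B =====
-- matches = [i for i in range(len(num1)) if num1[i] == num2[i]]; if len != 1 return None; else splice around matches[0]
def check_alt (num1 : String) (num2 : String) : Option String :=
  let l1 := num1.toList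
  let l2 := num2.toList
  let ms := (PySem.List.pyRange 0 l1.length 1).filter
    (fun i => PySem.List.pyGetD l1 i ' ' == PySem.List.pyGetD l2 i ' ')
  match ms with
  | [idx] => some (String.ofList (PySem.List.slice l1 none (some idx) ++ '-' :: PySem.List.slice l1 (some (idx + 1)) none))
  | _ => none

-- ===== PRECONDITION & SPEC =====
-- Pre_ excludes exactly the inputs where Python A raises IndexError: num2 shorter than num1 (B raises there too).
def Pre_check (num1 : String) (num2 : String) : Prop := num1.length ≤ num2.length
instance (num1 : String) (num2 : String) : Decidable (Pre_check num1 num2) := by unfold Pre_check; infer_instance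
def pvWitness_check : String × String := ("ab", "ac")
def Spec_check (num1 : String) (num2 : String) (out : Option String) : Prop := out = check_alt num1 num2
instance (num1 : String) (num2 : String) (out : Option String) : Decidable (Spec_check num1 num2 out) := by unfold Spec_check; infer_instance

-- ===== CLAIM (what is proved, stated in full; the proofs are below) =====
def Claim_equal_check : Prop := ∀ (num1 : String) (num2 : String), Dom_check num1 num2 → Pre_check num1 num2 → Spec_check num1 num2 (check num1 num2)

-- ===== LEMMAS AND PROOFS =====

theorem fold_state (l1 l2 : List Char) (n : Nat) :
    (List.range n).foldl
      (fun (st : List Char × Int) (k : Nat) =>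
        if l1.getD k ' ' = l2.getD k ' ' then (st.1 ++ ['-'], st.2 + 1)
        else (st.1 ++ [l1.getD k ' '], st.2)) ([], 0)
    = ((List.range n).map (fun k => if l1.getD k ' ' = l2.getD k ' ' then '-' else l1.getD k ' '),
       (((List.range n).filter (fun k => l1.getD k ' ' == l2.getD k ' ')).length : Int)) := by
  induction n with
  | zero => simp
  | succ m ih =>
    rw [List.range_succ, List.foldl_append, ih, List.map_append, List.filter_append]
    by_cases h : l1[m]?.getD ' ' = l2[m]?.getD ' ' <;>
      simp [List.getD, h]

theorem combine_of_unique (l1 l2 : List Char) (i : Nat)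
    (hfil : (List.range l1.length).filter (fun k => l1.getD k ' ' == l2.getD k ' ') = [i]) :
    (List.range l1.length).map (fun k => if l1.getD k ' ' = l2.getD k ' ' then '-' else l1.getD k ' ')
    = l1.take i ++ '-' :: l1.drop (i + 1) := by
  have hmem : i ∈ (List.range l1.length).filter (fun k => l1.getD k ' ' == l2.getD k ' ') := by
    rw [hfil]; exact List.mem_singleton.mpr rfl
  have hi : i < l1.length := by
    have := List.mem_range.mp (List.mem_of_mem_filter hmem); exact this
  have hPi : l1.getD i ' ' = l2.getD i ' ' := by
    have := List.of_mem_filter hmem; simpa using this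
  have huniq : ∀ k, k < l1.length → l1.getD k ' ' = l2.getD k ' ' → k = i := by
    intro k hk hP
    have : k ∈ (List.range l1.length).filter (fun k => l1.getD k ' ' == l2.getD k ' ') := by
      exact List.mem_filter.mpr ⟨List.mem_range.mpr hk, by simpa using hP⟩
    rw [hfil] at this; exact List.mem_singleton.mp this
  apply List.ext_getElem
  · simp; omega
  · intro j hj hj'
    simp only [List.length_map, List.length_range] at hj
    rw [List.getElem_map, List.getElem_range]
    rcases lt_trichotomy j i with hlt | heq | hgt
    · have hne : ¬ l1.getD j ' ' = l2.getD j ' ' := fun h => by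
        have := huniq j (by omega) h; omega
      rw [if_neg hne, List.getElem_append_left (by simp; omega)]
      simp [List.getD, List.getElem?_eq_getElem hj]
    · subst heq
      rw [if_pos hPi]
      simp [List.getElem_cons, Nat.min_eq_left hi.le]
    · have hne : ¬ l1.getD j ' ' = l2.getD j ' ' := fun h => by
        have := huniq j (by omega) h; omega
      rw [if_neg hne]
      have hlen : (l1.take i).length = i := by simp; omega
      have h2 : ¬ j < i := by omega
      have h3 : ¬ j - i = 0 := by omega
      simp only [List.getElem_append, hlen, h2, dite_false, List.getElem_cons, h3]
      rw [List.getElem_drop]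
      simp [List.getD, List.getElem?_eq_getElem hj]
      congr 1; omega

-- ===== VERDICT (by name: the statement is the Claim_ definition above) =====
theorem check_spec : Claim_equal_check := by
  intro num1 num2 _ _
  unfold Spec_check check check_alt
  simp only [PySem.List.pyRange_zero_natCast, List.foldl_map, List.filter_map,
    Function.comp_def, PySem.List.pyGetD_natCast]
  rw [fold_state]
  rcases hF : (List.range num1.toList.length).filter
      (fun k => num1.toList.getD k ' ' == num2.toList.getD k ' ') with _ | ⟨i, _ | ⟨j, t⟩⟩
  · simp
  · have hcomb := combine_of_unique num1.toList num2.toList i hF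
    have hi : i < num1.toList.length := by
      have hm : i ∈ (List.range num1.toList.length).filter
          (fun k => num1.toList.getD k ' ' == num2.toList.getD k ' ') := by
        rw [hF]; exact List.mem_singleton.mpr rfl
      exact List.mem_range.mp (List.mem_of_mem_filter hm)
    simp only [List.map_cons, List.map_nil, List.length_cons, List.length_nil]
    rw [hcomb]
    rw [show ((i : Int) + 1) = ((i + 1 : Nat) : Int) by push_cast; ring]
    rw [PySem.List.slice_to_natCast, PySem.List.slice_from_natCast]
    simp
  · simp
    omega
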